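-- pv_equiv track=rewrite | github.com/ASPP/pelita | pelita/team.py | create_homezones
-- ===== SOURCE A (Python) =====
-- def create_homezones(shape, walls):
--     width, height = shape
--     return [
--         tuple((x, y) for x in range(0, width // 2)
--                      for y in range(0, height) if (x, y) not in walls),
--         tuple((x, y) for x in range(width // 2, width)
--                      for y in range(0, height) if (x, y) not in walls)
--     ]
-- ===== SOURCE B (Python) =====
-- def create_homezones(shape, walls):
--     width, height = shape
--     half = width // 2
--
--     def column(x):
--         # per-column sorted wall rows; the column's cells are the gaps between them
--         blocked = sorted(set(y for (wx, y) in walls if wx == x and 0 <= y < height))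
--         cells = []
--         prev = 0
--         for b in blocked:
--             cells.extend((x, y) for y in range(prev, b))
--             prev = b + 1
--         cells.extend((x, y) for y in range(prev, height))
--         return cells
--
--     left = []
--     for x in range(0, half):
--         left += column(x)
--     right = []
--     for x in range(half, width):
--         right += column(x)
--     return [tuple(left), tuple(right)]
-- ===== Notes on version B (the rewrite author's own statement) =====
-- stated objective: alternative
-- what changed: Instead of testing every grid cell for membership in the walls list, B collects and sorts the in-range wall rows of each column once and emits each column's cells as the gap ranges between consecutive blocked rows.
import Mathlib
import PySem

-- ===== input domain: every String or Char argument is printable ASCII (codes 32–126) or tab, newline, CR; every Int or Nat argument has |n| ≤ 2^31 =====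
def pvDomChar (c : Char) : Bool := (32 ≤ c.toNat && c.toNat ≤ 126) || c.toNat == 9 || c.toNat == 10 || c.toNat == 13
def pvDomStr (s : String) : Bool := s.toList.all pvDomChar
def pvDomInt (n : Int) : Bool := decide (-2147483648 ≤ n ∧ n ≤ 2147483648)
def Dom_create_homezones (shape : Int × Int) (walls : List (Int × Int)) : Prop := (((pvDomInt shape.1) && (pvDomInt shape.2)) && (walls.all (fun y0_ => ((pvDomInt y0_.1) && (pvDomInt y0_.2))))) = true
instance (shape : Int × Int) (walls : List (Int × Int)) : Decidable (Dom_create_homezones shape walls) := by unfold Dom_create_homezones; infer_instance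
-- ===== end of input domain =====

-- B builds each column from the sorted per-column wall rows and emits the gap ranges
-- between them, instead of testing every grid cell against the walls list (alternative).

-- ===== PORT A =====
-- the two generator comprehensions, transliterated: for x in range(a,b) for y in range(0,height) if (x,y) not in walls
def create_homezones (shape : Int × Int) (walls : List (Int × Int)) : List (List (Int × Int)) :=
  let width := shape.1
  let height := shape.2
  [ (PySem.List.pyRange 0 (PySem.Int.floordiv width 2) 1).flatMap (fun x =>
      ((PySem.List.pyRange 0 height 1).filter (fun y => !decide ((x, y) ∈ walls))).map (fun y => (x, y))),
    (PySem.List.pyRange (PySem.Int.floordiv width 2) width 1).flatMap (fun x =>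
      ((PySem.List.pyRange 0 height 1).filter (fun y => !decide ((x, y) ∈ walls))).map (fun y => (x, y))) ]

-- ===== PORT B =====
-- helper 'column' of Source B: blocked = sorted(set(in-range wall rows of column x)); walk the gaps
def pvColumn (walls : List (Int × Int)) (height x : Int) : List (Int × Int) :=
  let blocked := PySem.List.sorted
    (PySem.Set.ofList ((walls.filter (fun w => decide (w.1 = x) && decide (0 ≤ w.2) && decide (w.2 < height))).map Prod.snd))
    (fun y => y) false
  let p := blocked.foldl (fun (q : List (Int × Int) × Int) b =>
      (q.1 ++ (PySem.List.pyRange q.2 b 1).map (fun y => (x, y)), b + 1)) ([], 0)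
  p.1 ++ (PySem.List.pyRange p.2 height 1).map (fun y => (x, y))

def create_homezones_alt (shape : Int × Int) (walls : List (Int × Int)) : List (List (Int × Int)) :=
  let width := shape.1
  let height := shape.2
  let half := PySem.Int.floordiv width 2
  let left := (PySem.List.pyRange 0 half 1).foldl (fun acc x => acc ++ pvColumn walls height x) []
  let right := (PySem.List.pyRange half width 1).foldl (fun acc x => acc ++ pvColumn walls height x) []
  [left, right]

-- ===== PRECONDITION & SPEC =====
def Spec_create_homezones (shape : Int × Int) (walls : List (Int × Int)) (out : List (List (Int × Int))) : Prop := out = create_homezones_alt shape walls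
instance (shape : Int × Int) (walls : List (Int × Int)) (out : List (List (Int × Int))) : Decidable (Spec_create_homezones shape walls out) := by unfold Spec_create_homezones; infer_instance

-- ===== CLAIM (what is proved, stated in full; the proofs are below) =====
def Claim_equal_create_homezones : Prop := ∀ (shape : Int × Int) (walls : List (Int × Int)), Dom_create_homezones shape walls → Spec_create_homezones shape walls (create_homezones shape walls)

-- ===== LEMMAS AND PROOFS =====

-- the gap walk over a strictly increasing list of blocked rows equals filtering the full range
theorem pv_gaps (x height : Int) (bs : List Int) (acc : List (Int × Int)) (prev : Int)
    (hs : bs.Pairwise (· < ·)) (hb : ∀ b ∈ bs, prev ≤ b ∧ b < height) :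
    (let p := bs.foldl (fun (q : List (Int × Int) × Int) b =>
        (q.1 ++ (PySem.List.pyRange q.2 b 1).map (fun y => (x, y)), b + 1)) (acc, prev)
     p.1 ++ (PySem.List.pyRange p.2 height 1).map (fun y => (x, y)))
    = acc ++ ((PySem.List.pyRange prev height 1).filter (fun y => !decide (y ∈ bs))).map (fun y => (x, y)) := by
  induction bs generalizing acc prev with
  | nil =>
    simp
  | cons b bs ih =>
    obtain ⟨hpb, hbh⟩ := hb b (by simp)
    have hlt : ∀ b' ∈ bs, b < b' := by
      intro b' hb'; exact (List.pairwise_cons.1 hs).1 b' hb'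
    have hb' : ∀ b' ∈ bs, b + 1 ≤ b' ∧ b' < height := by
      intro b' hb'; exact ⟨by have := hlt b' hb'; omega, (hb b' (by simp [hb'])).2⟩
    simp only [List.foldl_cons]
    rw [ih _ _ (List.pairwise_cons.1 hs).2 hb']
    have hsplit : PySem.List.pyRange prev height 1
        = PySem.List.pyRange prev b 1 ++ PySem.List.pyRange b height 1 := by
      exact PySem.List.pyRange_one_append prev b height hpb (by omega)
    have hcons : PySem.List.pyRange b height 1 = b :: PySem.List.pyRange (b + 1) height 1 :=
      PySem.List.pyRange_one_cons hbh
    rw [hsplit, hcons, List.filter_append, List.filter_cons]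
    have h1 : (PySem.List.pyRange prev b 1).filter (fun y => !decide (y ∈ b :: bs))
        = PySem.List.pyRange prev b 1 := by
      apply List.filter_eq_self.2
      intro y hy
      have hy' := (PySem.List.mem_pyRange_one.1 hy).2
      have : y ∉ bs := fun h => absurd (hlt y h) (by omega)
      simp only [Bool.not_eq_true', decide_eq_false_iff_not, List.mem_cons, not_or]
      exact ⟨by omega, this⟩
    have h2 : (PySem.List.pyRange (b + 1) height 1).filter (fun y => !decide (y ∈ b :: bs))
        = (PySem.List.pyRange (b + 1) height 1).filter (fun y => !decide (y ∈ bs)) := by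
      apply List.filter_congr
      intro y hy
      have hy' := (PySem.List.mem_pyRange_one.1 hy).1
      have : y ≠ b := by omega
      simp [this]
    rw [h1, h2]; simp

-- each column of B equals A's per-column filter
theorem pv_column (walls : List (Int × Int)) (height x : Int) :
    pvColumn walls height x
    = ((PySem.List.pyRange 0 height 1).filter (fun y => !decide ((x, y) ∈ walls))).map (fun y => (x, y)) := by
  unfold pvColumn
  set bs := PySem.List.sorted
    (PySem.Set.ofList ((walls.filter (fun w => decide (w.1 = x) && decide (0 ≤ w.2) && decide (w.2 < height))).map Prod.snd))
    (fun y => y) false with hbs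
  have hmem : ∀ y : Int, y ∈ bs ↔ ((x, y) ∈ walls ∧ 0 ≤ y ∧ y < height) := by
    intro y
    rw [hbs, PySem.List.mem_sorted, PySem.Set.mem_ofList, List.mem_map]
    constructor
    · rintro ⟨w, hw, rfl⟩
      have := List.mem_filter.1 hw
      simp only [Bool.and_eq_true, decide_eq_true_eq] at this
      obtain ⟨hwmem, ⟨hx, h0⟩, hh⟩ := this
      refine ⟨?_, h0, hh⟩
      have : w = (x, w.2) := by ext <;> simp [hx]
      rw [← this]; exact hwmem
    · rintro ⟨hw, h0, hh⟩
      exact ⟨(x, y), List.mem_filter.2 ⟨hw, by simp [h0, hh]⟩, rfl⟩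
  have hsorted : bs.Pairwise (· < ·) := by
    rw [hbs]; exact PySem.List.sorted_ofList_pairwise_lt _
  have hb : ∀ b ∈ bs, (0 : Int) ≤ b ∧ b < height := by
    intro b h; have := (hmem b).1 h; exact ⟨this.2.1, this.2.2⟩
  rw [pv_gaps x height bs [] 0 hsorted hb]
  simp only [List.nil_append]
  congr 1
  apply List.filter_congr
  intro y hy
  have := PySem.List.mem_pyRange_one.1 hy
  simp [hmem y, this.1, this.2]

theorem create_homezones_spec' (shape : Int × Int) (walls : List (Int × Int)) :
    create_homezones shape walls = create_homezones_alt shape walls := by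
  obtain ⟨width, height⟩ := shape
  simp only [create_homezones, create_homezones_alt]
  rw [PySem.List.foldl_append_eq_flatMap, PySem.List.foldl_append_eq_flatMap]
  simp only [List.nil_append]
  have hf : (fun x => ((PySem.List.pyRange 0 height 1).filter (fun y => !decide ((x, y) ∈ walls))).map (fun y => (x, y)))
      = pvColumn walls height := funext fun x => (pv_column walls height x).symm
  rw [hf]

-- ===== VERDICT (by name: the statement is the Claim_ definition above) =====
theorem create_homezones_spec : Claim_equal_create_homezones := by
  intro shape walls _
  unfold Spec_create_homezones
  exact create_homezones_spec' shape walls
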